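-- pv_equiv track=rewrite | github.com/unarmedpuppy/homelab-ai | agents/registry/capability_mapping.py | get_capability_summary
-- ===== SOURCE A (Python) =====
-- from typing import List, Dict, Optional
--
-- def get_capability_summary(capabilities: List[str]) -> Dict[str, int]:
--     """
--     Get summary statistics for capabilities.
--
--     Args:
--         capabilities: List of capability strings
--
--     Returns:
--         Dictionary with counts by category
--     """
--     summary = {
--         'total': len(capabilities),
--         'skills': 0,
--         'mcp_tools': 0,
--         'domain_knowledge': 0,
--         'other': 0
--     }
--
--     # Categorize capabilities
--     for cap in capabilities:
--         if cap.startswith('troubleshoot-') or cap.startswith('standard-') or \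
--            cap.startswith('deploy-') or cap.startswith('add-') or \
--            cap.startswith('cleanup-') or cap.startswith('system-') or \
--            cap.startswith('agent-'):
--             summary['skills'] += 1
--         elif '_management' in cap or '_monitoring' in cap or \
--              '_operations' in cap or '_coordination' in cap or \
--              cap.endswith('_tools'):
--             summary['mcp_tools'] += 1
--         elif '_administration' in cap or '_orchestration' in cap or \
--              cap in ['docker', 'linux', 'networking', 'git']:
--             summary['domain_knowledge'] += 1
--         else:
--             summary['other'] += 1
--
--     return summary
-- ===== SOURCE B (Python) =====
-- def _category(cap):
--     # locate the first '-' and test the verb before it against a fixed vocabulary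
--     dash = cap.find('-')
--     if dash >= 0 and cap[:dash] in ('troubleshoot', 'standard', 'deploy', 'add',
--                                     'cleanup', 'system', 'agent'):
--         return 'skills'
--     # suffixes following each underscore in cap
--     tails = [cap[i + 1:] for i, ch in enumerate(cap) if ch == '_']
--     if any(t.startswith(('management', 'monitoring', 'operations', 'coordination'))
--            or t == 'tools' for t in tails):
--         return 'mcp_tools'
--     if any(t.startswith(('administration', 'orchestration')) for t in tails) or \
--        cap in ('docker', 'linux', 'networking', 'git'):
--         return 'domain_knowledge'
--     return 'other'
--
--
-- def get_capability_summary(capabilities):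
--     counts = {'skills': 0, 'mcp_tools': 0, 'domain_knowledge': 0, 'other': 0}
--     for cap in capabilities:
--         counts[_category(cap)] += 1
--     return {'total': len(capabilities), **counts}
-- ===== Notes on version B (the rewrite author's own statement) =====
-- stated objective: alternative
-- what changed: Replaces A's seven startswith tests by a single find('-') plus slice plus vocabulary membership, and replaces its substring ('_management' in cap ...) and endswith('_tools') scans by enumerating the suffix after each underscore once and prefix/equality-testing those tails.
import Mathlib
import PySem

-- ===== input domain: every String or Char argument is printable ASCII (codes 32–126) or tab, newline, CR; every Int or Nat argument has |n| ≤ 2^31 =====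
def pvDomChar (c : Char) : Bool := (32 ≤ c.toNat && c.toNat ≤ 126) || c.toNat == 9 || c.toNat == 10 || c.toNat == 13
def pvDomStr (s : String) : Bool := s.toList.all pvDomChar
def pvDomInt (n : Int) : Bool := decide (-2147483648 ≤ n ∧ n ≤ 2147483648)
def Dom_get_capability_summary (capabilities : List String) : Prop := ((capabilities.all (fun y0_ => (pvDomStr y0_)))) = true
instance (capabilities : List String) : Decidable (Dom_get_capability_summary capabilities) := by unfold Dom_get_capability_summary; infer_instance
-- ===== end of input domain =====

-- B classifies each capability by locating the first '-' and matching the verb before it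
-- against a vocabulary, and by enumerating the suffix after each '_' and prefix/equality-
-- testing those tails, instead of A's battery of startswith/substring/endswith scans;
-- objective: alternative (same cost, different mechanism).

-- ===== PORT A =====
-- one iteration of A's for-loop: the if/elif/else chain incrementing one dict entry
def capSummaryStep (d : PySem.Dict String Int) (cap : String) : PySem.Dict String Int :=
  if PySem.Str.startswith cap "troubleshoot-" || PySem.Str.startswith cap "standard-" ||
     PySem.Str.startswith cap "deploy-" || PySem.Str.startswith cap "add-" ||
     PySem.Str.startswith cap "cleanup-" || PySem.Str.startswith cap "system-" ||
     PySem.Str.startswith cap "agent-" then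
    d.modify "skills" 0 (· + 1)
  else if PySem.Str.isIn "_management" cap || PySem.Str.isIn "_monitoring" cap ||
          PySem.Str.isIn "_operations" cap || PySem.Str.isIn "_coordination" cap ||
          PySem.Str.endswith cap "_tools" then
    d.modify "mcp_tools" 0 (· + 1)
  else if PySem.Str.isIn "_administration" cap || PySem.Str.isIn "_orchestration" cap ||
          ["docker", "linux", "networking", "git"].contains cap then
    d.modify "domain_knowledge" 0 (· + 1)
  else
    d.modify "other" 0 (· + 1)

def get_capability_summary (capabilities : List String) : List (String × Int) :=
  (capabilities.foldl capSummaryStep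
    (PySem.Dict.mk [("total", (capabilities.length : Int)), ("skills", 0),
                    ("mcp_tools", 0), ("domain_knowledge", 0), ("other", 0)])).items

-- ===== PORT B =====
-- Source B's _category, on the code-point lists (PySem strings are defined over List Char)
def capCategoryB (cap : String) : String :=
  let cs := cap.toList
  let dash := PySem.Chars.find cs ['-']
  -- cap[:dash] in ('troubleshoot', …): head slice tested against the verb vocabulary
  if 0 ≤ dash ∧ PySem.List.slice cs none (some dash) ∈
      ["troubleshoot".toList, "standard".toList, "deploy".toList, "add".toList,
       "cleanup".toList, "system".toList, "agent".toList] then "skills"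
  else
    -- tails = [cap[i+1:] for i, ch in enumerate(cap) if ch == '_']
    let tails := ((PySem.List.enumerate cs 0).filter (fun p => p.2 == '_')).map
                   (fun p => PySem.List.slice cs (some (p.1 + 1)) none)
    if tails.any (fun t => PySem.Chars.startswith t "management".toList ||
                           PySem.Chars.startswith t "monitoring".toList ||
                           PySem.Chars.startswith t "operations".toList ||
                           PySem.Chars.startswith t "coordination".toList ||
                           t == "tools".toList) then "mcp_tools"
    else if tails.any (fun t => PySem.Chars.startswith t "administration".toList ||
                                PySem.Chars.startswith t "orchestration".toList) ||
            cs ∈ ["docker".toList, "linux".toList, "networking".toList, "git".toList] then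
      "domain_knowledge"
    else "other"

def get_capability_summary_alt (capabilities : List String) : List (String × Int) :=
  let counts := capabilities.foldl (fun d cap => d.modify (capCategoryB cap) 0 (· + 1))
    (PySem.Dict.mk [("skills", 0), ("mcp_tools", 0), ("domain_knowledge", 0), ("other", 0)])
  -- {'total': len(capabilities), **counts}: 'total' is not a key of counts, so the
  -- resulting dict's items are exactly ('total', n) followed by counts' items
  ("total", (capabilities.length : Int)) :: counts.items

-- ===== PRECONDITION & SPEC =====
def Spec_get_capability_summary (capabilities : List String) (out : List (String × Int)) : Prop := out = get_capability_summary_alt capabilities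
instance (capabilities : List String) (out : List (String × Int)) : Decidable (Spec_get_capability_summary capabilities out) := by unfold Spec_get_capability_summary; infer_instance

-- ===== CLAIM (what is proved, stated in full; the proofs are below) =====
def Claim_equal_get_capability_summary : Prop := ∀ (capabilities : List String), Dom_get_capability_summary capabilities → Spec_get_capability_summary capabilities (get_capability_summary capabilities)

-- ===== LEMMAS AND PROOFS =====

-- (c :: w) is a prefix of cs.drop j  ↔  cs[j] = c and w prefixes the rest
lemma cons_prefix_drop_iff {α : Type} {c : α} {w cs : List α} {j : Nat} :
    (c :: w) <+: cs.drop j ↔ ∃ h : j < cs.length, cs[j] = c ∧ w <+: cs.drop (j + 1) := by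
  by_cases hj : j < cs.length
  · rw [List.drop_eq_getElem_cons hj, List.cons_prefix_cons]
    constructor
    · rintro ⟨h1, h2⟩; exact ⟨hj, h1.symm, h2⟩
    · rintro ⟨_, h1, h2⟩; exact ⟨h1.symm, h2⟩
  · have : cs.drop j = [] := List.drop_eq_nil_of_le (by omega)
    simp [this, hj]

-- (c :: w) is a suffix of cs ↔ some position j holds c and the rest equals w
lemma cons_suffix_iff {α : Type} {c : α} {w cs : List α} :
    (c :: w) <:+ cs ↔ ∃ (j : Nat) (h : j < cs.length), cs[j] = c ∧ cs.drop (j + 1) = w := by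
  constructor
  · rintro ⟨pre, rfl⟩
    have hj : pre.length < (pre ++ c :: w).length := by simp
    have hcons := List.drop_eq_getElem_cons hj
    rw [show (pre ++ c :: w).drop pre.length = c :: w by simp] at hcons
    injection hcons with h1 h2
    exact ⟨pre.length, hj, h1.symm, h2.symm⟩
  · rintro ⟨j, h, hc, hw⟩
    have hd : cs.drop j = c :: w := by
      rw [List.drop_eq_getElem_cons h, hc, hw]
    rw [← hd]; exact List.drop_suffix j cs

-- startswith cap (w ++ "-"), for a dash-free w, read off the first '-' of cap
lemma prefix_dash_iff {cs w : List Char} (hw : '-' ∉ w) :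
    (w ++ ['-']) <+: cs ↔
    0 ≤ PySem.Chars.find cs ['-'] ∧
      PySem.List.slice cs none (some (PySem.Chars.find cs ['-'])) = w := by
  constructor
  · rintro ⟨t, rfl⟩
    have hocc : (['-'] : List Char) <+: (w ++ ['-'] ++ t).drop w.length := by
      simp
    have h0 : 0 ≤ PySem.Chars.find (w ++ ['-'] ++ t) ['-'] := by
      rw [PySem.Chars.find_nonneg_iff]
      exact ⟨w, t, by simp⟩
    obtain ⟨hpre, hmin⟩ := PySem.Chars.find_spec h0
    set d := (PySem.Chars.find (w ++ ['-'] ++ t) ['-']).toNat with hdef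
    have hle : d ≤ w.length := by
      by_contra hgt
      exact hmin w.length (by omega) hocc
    obtain ⟨hdl, hcd, -⟩ := cons_prefix_drop_iff.mp hpre
    have hde : d = w.length := by
      rcases Nat.lt_or_ge d w.length with hlt | hge
      · exfalso
        have e1 : (w ++ ['-'] ++ t)[d]'hdl = (w ++ ['-'])[d]'(by simp; omega) :=
          List.getElem_append_left (by simp; omega)
        have e2 : (w ++ ['-'])[d]'(by simp; omega) = w[d]'hlt :=
          List.getElem_append_left hlt
        rw [e1, e2] at hcd
        exact hw (hcd ▸ List.getElem_mem _)
      · omega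
    refine ⟨h0, ?_⟩
    rw [PySem.List.slice_to _ h0, ← hdef, hde, List.append_assoc, List.take_left]
  · rintro ⟨h0, hsl⟩
    obtain ⟨hpre, -⟩ := PySem.Chars.find_spec h0
    obtain ⟨hdl, hcd, -⟩ := cons_prefix_drop_iff.mp hpre
    rw [PySem.List.slice_to _ h0] at hsl
    have : cs = w ++ ['-'] ++ cs.drop ((PySem.Chars.find cs ['-']).toNat + 1) := by
      conv_lhs => rw [← List.take_append_drop (PySem.Chars.find cs ['-']).toNat cs]
      rw [hsl, List.drop_eq_getElem_cons hdl, hcd]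
      simp
    exact ⟨cs.drop ((PySem.Chars.find cs ['-']).toNat + 1), this.symm⟩

-- the tails list of B, tested by any f, is an existential over underscore positions
lemma tails_any_iff {cs : List Char} {f : List Char → Bool} :
    ((((PySem.List.enumerate cs 0).filter (fun p => p.2 == '_')).map
        (fun p => PySem.List.slice cs (some (p.1 + 1)) none)).any f = true) ↔
    ∃ (j : Nat) (h : j < cs.length), cs[j] = '_' ∧ f (cs.drop (j + 1)) = true := by
  rw [List.any_eq_true]
  constructor
  · rintro ⟨t, ht, hf⟩
    obtain ⟨p, hp, rfl⟩ := List.mem_map.mp ht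
    obtain ⟨hpe, hpu⟩ := List.mem_filter.mp hp
    obtain ⟨k, hk, rfl⟩ := (PySem.List.mem_enumerate_iff _ _ _).mp hpe
    have hsl : PySem.List.slice cs (some ((0 + (k : Int)) + 1)) none = cs.drop (k + 1) := by
      rw [PySem.List.slice_from _ (by omega)]
      congr 1
      omega
    refine ⟨k, hk, by simpa using hpu, ?_⟩
    rw [← hsl]; exact hf
  · rintro ⟨j, h, hu, hf⟩
    refine ⟨cs.drop (j + 1), List.mem_map.mpr ⟨((0 + (j : Int)), cs[j]), ?_, ?_⟩, hf⟩
    · exact List.mem_filter.mpr ⟨(PySem.List.mem_enumerate_iff _ _ _).mpr ⟨j, h, rfl⟩, by simpa using hu⟩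
    · rw [PySem.List.slice_from _ (by omega)]
      congr 1
      omega

-- '_w' occurs in cs ↔ some underscore tail starts with w
lemma isIn_underscore_iff {cs w : List Char} :
    PySem.Chars.isIn ('_' :: w) cs = true ↔
    ∃ (j : Nat) (h : j < cs.length), cs[j] = '_' ∧ w <+: cs.drop (j + 1) := by
  rw [← PySem.Chars.exists_prefix_drop_iff_isIn]
  constructor
  · rintro ⟨j, hp⟩
    obtain ⟨h, hc, hw⟩ := cons_prefix_drop_iff.mp hp
    exact ⟨j, h, hc, hw⟩
  · rintro ⟨j, h, hc, hw⟩
    exact ⟨j, cons_prefix_drop_iff.mpr ⟨h, hc, hw⟩⟩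

-- A's skills condition = B's skills condition
lemma cond_skills_iff (cap : String) :
    (PySem.Str.startswith cap "troubleshoot-" || PySem.Str.startswith cap "standard-" ||
     PySem.Str.startswith cap "deploy-" || PySem.Str.startswith cap "add-" ||
     PySem.Str.startswith cap "cleanup-" || PySem.Str.startswith cap "system-" ||
     PySem.Str.startswith cap "agent-") = true ↔
    (0 ≤ PySem.Chars.find cap.toList ['-'] ∧
     PySem.List.slice cap.toList none (some (PySem.Chars.find cap.toList ['-'])) ∈
       ["troubleshoot".toList, "standard".toList, "deploy".toList, "add".toList,
        "cleanup".toList, "system".toList, "agent".toList]) := by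
  have e1 : ("troubleshoot-").toList = "troubleshoot".toList ++ ['-'] := rfl
  have e2 : ("standard-").toList = "standard".toList ++ ['-'] := rfl
  have e3 : ("deploy-").toList = "deploy".toList ++ ['-'] := rfl
  have e4 : ("add-").toList = "add".toList ++ ['-'] := rfl
  have e5 : ("cleanup-").toList = "cleanup".toList ++ ['-'] := rfl
  have e6 : ("system-").toList = "system".toList ++ ['-'] := rfl
  have e7 : ("agent-").toList = "agent".toList ++ ['-'] := rfl
  have p1 := prefix_dash_iff (cs := cap.toList) (w := "troubleshoot".toList) (by decide)
  have p2 := prefix_dash_iff (cs := cap.toList) (w := "standard".toList) (by decide)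
  have p3 := prefix_dash_iff (cs := cap.toList) (w := "deploy".toList) (by decide)
  have p4 := prefix_dash_iff (cs := cap.toList) (w := "add".toList) (by decide)
  have p5 := prefix_dash_iff (cs := cap.toList) (w := "cleanup".toList) (by decide)
  have p6 := prefix_dash_iff (cs := cap.toList) (w := "system".toList) (by decide)
  have p7 := prefix_dash_iff (cs := cap.toList) (w := "agent".toList) (by decide)
  simp only [Bool.or_eq_true, PySem.Str.startswith_eq, PySem.Chars.startswith_iff,
    e1, e2, e3, e4, e5, e6, e7, p1, p2, p3, p4, p5, p6, p7,
    List.mem_cons, List.not_mem_nil, or_false]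
  constructor
  · rintro ((((((⟨h0, hs⟩ | ⟨h0, hs⟩) | ⟨h0, hs⟩) | ⟨h0, hs⟩) | ⟨h0, hs⟩) | ⟨h0, hs⟩) | ⟨h0, hs⟩)
    · exact ⟨h0, Or.inl hs⟩
    · exact ⟨h0, Or.inr (Or.inl hs)⟩
    · exact ⟨h0, Or.inr (Or.inr (Or.inl hs))⟩
    · exact ⟨h0, Or.inr (Or.inr (Or.inr (Or.inl hs)))⟩
    · exact ⟨h0, Or.inr (Or.inr (Or.inr (Or.inr (Or.inl hs))))⟩
    · exact ⟨h0, Or.inr (Or.inr (Or.inr (Or.inr (Or.inr (Or.inl hs)))))⟩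
    · exact ⟨h0, Or.inr (Or.inr (Or.inr (Or.inr (Or.inr (Or.inr hs)))))⟩
  · rintro ⟨h0, (hs | hs | hs | hs | hs | hs | hs)⟩
    · exact Or.inl (Or.inl (Or.inl (Or.inl (Or.inl (Or.inl ⟨h0, hs⟩)))))
    · exact Or.inl (Or.inl (Or.inl (Or.inl (Or.inl (Or.inr ⟨h0, hs⟩)))))
    · exact Or.inl (Or.inl (Or.inl (Or.inl (Or.inr ⟨h0, hs⟩))))
    · exact Or.inl (Or.inl (Or.inl (Or.inr ⟨h0, hs⟩)))
    · exact Or.inl (Or.inl (Or.inr ⟨h0, hs⟩))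
    · exact Or.inl (Or.inr ⟨h0, hs⟩)
    · exact Or.inr ⟨h0, hs⟩

-- A's mcp_tools condition = B's mcp_tools condition
lemma cond_mcp_iff (cap : String) :
    (PySem.Str.isIn "_management" cap || PySem.Str.isIn "_monitoring" cap ||
     PySem.Str.isIn "_operations" cap || PySem.Str.isIn "_coordination" cap ||
     PySem.Str.endswith cap "_tools") = true ↔
    (((PySem.List.enumerate cap.toList 0).filter (fun p => p.2 == '_')).map
        (fun p => PySem.List.slice cap.toList (some (p.1 + 1)) none)).any
      (fun t => PySem.Chars.startswith t "management".toList ||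
                PySem.Chars.startswith t "monitoring".toList ||
                PySem.Chars.startswith t "operations".toList ||
                PySem.Chars.startswith t "coordination".toList ||
                t == "tools".toList) = true := by
  rw [tails_any_iff]
  have e1 : ("_management").toList = '_' :: "management".toList := rfl
  have e2 : ("_monitoring").toList = '_' :: "monitoring".toList := rfl
  have e3 : ("_operations").toList = '_' :: "operations".toList := rfl
  have e4 : ("_coordination").toList = '_' :: "coordination".toList := rfl
  have e5 : ("_tools").toList = '_' :: "tools".toList := rfl
  simp only [Bool.or_eq_true, PySem.Str.isIn_eq, PySem.Str.endswith_eq,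
    e1, e2, e3, e4, e5, isIn_underscore_iff, PySem.Chars.endswith_iff, cons_suffix_iff,
    PySem.Chars.startswith_iff, beq_iff_eq]
  constructor
  · rintro ((((⟨j, h, hc, hw⟩ | ⟨j, h, hc, hw⟩) | ⟨j, h, hc, hw⟩) | ⟨j, h, hc, hw⟩) | ⟨j, h, hc, hw⟩)
    · exact ⟨j, h, hc, Or.inl (Or.inl (Or.inl (Or.inl hw)))⟩
    · exact ⟨j, h, hc, Or.inl (Or.inl (Or.inl (Or.inr hw)))⟩
    · exact ⟨j, h, hc, Or.inl (Or.inl (Or.inr hw))⟩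
    · exact ⟨j, h, hc, Or.inl (Or.inr hw)⟩
    · exact ⟨j, h, hc, Or.inr hw⟩
  · rintro ⟨j, h, hc, ((((hw | hw) | hw) | hw) | hw)⟩
    · exact Or.inl (Or.inl (Or.inl (Or.inl ⟨j, h, hc, hw⟩)))
    · exact Or.inl (Or.inl (Or.inl (Or.inr ⟨j, h, hc, hw⟩)))
    · exact Or.inl (Or.inl (Or.inr ⟨j, h, hc, hw⟩))
    · exact Or.inl (Or.inr ⟨j, h, hc, hw⟩)
    · exact Or.inr ⟨j, h, hc, hw⟩

-- A's domain_knowledge condition = B's domain_knowledge condition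
lemma cond_dk_iff (cap : String) :
    (PySem.Str.isIn "_administration" cap || PySem.Str.isIn "_orchestration" cap ||
     ["docker", "linux", "networking", "git"].contains cap) = true ↔
    ((((PySem.List.enumerate cap.toList 0).filter (fun p => p.2 == '_')).map
        (fun p => PySem.List.slice cap.toList (some (p.1 + 1)) none)).any
      (fun t => PySem.Chars.startswith t "administration".toList ||
                PySem.Chars.startswith t "orchestration".toList) = true ∨
     cap.toList ∈ ["docker".toList, "linux".toList, "networking".toList, "git".toList]) := by
  rw [tails_any_iff]
  have e1 : ("_administration").toList = '_' :: "administration".toList := rfl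
  have e2 : ("_orchestration").toList = '_' :: "orchestration".toList := rfl
  have hlst : cap ∈ ["docker", "linux", "networking", "git"] ↔
      cap.toList ∈ ["docker".toList, "linux".toList, "networking".toList, "git".toList] := by
    simp only [List.mem_cons, List.not_mem_nil, or_false]
    constructor
    · rintro (rfl | rfl | rfl | rfl) <;> simp
    · rintro (h | h | h | h) <;>
        (have he := String.toList_inj.mp h; subst he; simp)
  simp only [Bool.or_eq_true, PySem.Str.isIn_eq, e1, e2, isIn_underscore_iff,
    List.contains_eq_mem, decide_eq_true_eq, hlst, PySem.Chars.startswith_iff]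
  constructor
  · rintro ((⟨j, h, hc, hw⟩ | ⟨j, h, hc, hw⟩) | hm)
    · exact Or.inl ⟨j, h, hc, Or.inl hw⟩
    · exact Or.inl ⟨j, h, hc, Or.inr hw⟩
    · exact Or.inr hm
  · rintro (⟨j, h, hc, hw | hw⟩ | hm)
    · exact Or.inl (Or.inl ⟨j, h, hc, hw⟩)
    · exact Or.inl (Or.inr ⟨j, h, hc, hw⟩)
    · exact Or.inr hm

-- A's per-element branch picks exactly B's category
lemma capSummaryStep_eq (d : PySem.Dict String Int) (cap : String) :
    capSummaryStep d cap = d.modify (capCategoryB cap) 0 (· + 1) := by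
  simp only [capSummaryStep, capCategoryB]
  by_cases h1 : (0 ≤ PySem.Chars.find cap.toList ['-'] ∧
      PySem.List.slice cap.toList none (some (PySem.Chars.find cap.toList ['-'])) ∈
        ["troubleshoot".toList, "standard".toList, "deploy".toList, "add".toList,
         "cleanup".toList, "system".toList, "agent".toList])
  · rw [if_pos ((cond_skills_iff cap).mpr h1), if_pos h1]
  · rw [if_neg (fun hc => h1 ((cond_skills_iff cap).mp hc)), if_neg h1]
    by_cases h2 : (((PySem.List.enumerate cap.toList 0).filter (fun p => p.2 == '_')).map
        (fun p => PySem.List.slice cap.toList (some (p.1 + 1)) none)).any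
      (fun t => PySem.Chars.startswith t "management".toList ||
                PySem.Chars.startswith t "monitoring".toList ||
                PySem.Chars.startswith t "operations".toList ||
                PySem.Chars.startswith t "coordination".toList ||
                t == "tools".toList) = true
    · rw [if_pos ((cond_mcp_iff cap).mpr h2), if_pos h2]
    · rw [if_neg (fun hc => h2 ((cond_mcp_iff cap).mp hc)), if_neg h2]
      by_cases h3 : ((((PySem.List.enumerate cap.toList 0).filter (fun p => p.2 == '_')).map
          (fun p => PySem.List.slice cap.toList (some (p.1 + 1)) none)).any
        (fun t => PySem.Chars.startswith t "administration".toList ||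
                  PySem.Chars.startswith t "orchestration".toList) = true ∨
        cap.toList ∈ ["docker".toList, "linux".toList, "networking".toList, "git".toList])
      · rw [if_pos ((cond_dk_iff cap).mpr h3), if_pos (by simpa using h3)]
      · rw [if_neg (fun hc => h3 ((cond_dk_iff cap).mp hc)), if_neg (by simpa using h3)]

lemma capCategoryB_cases (cap : String) :
    capCategoryB cap = "skills" ∨ capCategoryB cap = "mcp_tools" ∨
    capCategoryB cap = "domain_knowledge" ∨ capCategoryB cap = "other" := by
  simp only [capCategoryB]; split_ifs <;> simp

-- A's loop over the five-key dict, characterised by per-category counts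
lemma capSummary_loopA (caps : List String) (t s m k o : Int) :
    (caps.foldl (fun d cap => d.modify (capCategoryB cap) 0 (· + 1))
      (PySem.Dict.mk [("total", t), ("skills", s), ("mcp_tools", m),
                      ("domain_knowledge", k), ("other", o)])).items
    = [("total", t), ("skills", s + ((caps.map capCategoryB).count "skills" : Int)),
       ("mcp_tools", m + ((caps.map capCategoryB).count "mcp_tools" : Int)),
       ("domain_knowledge", k + ((caps.map capCategoryB).count "domain_knowledge" : Int)),
       ("other", o + ((caps.map capCategoryB).count "other" : Int))] := by
  induction caps generalizing s m k o with
  | nil => simp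
  | cons c cs ih =>
    rw [List.foldl_cons]
    rcases capCategoryB_cases c with h | h | h | h <;>
      · rw [show PySem.Dict.modify (PySem.Dict.mk [("total", t), ("skills", s), ("mcp_tools", m), ("domain_knowledge", k), ("other", o)]) (capCategoryB c) 0 (· + 1) =
            PySem.Dict.mk [("total", t), ("skills", if capCategoryB c = "skills" then s + 1 else s), ("mcp_tools", if capCategoryB c = "mcp_tools" then m + 1 else m), ("domain_knowledge", if capCategoryB c = "domain_knowledge" then k + 1 else k), ("other", if capCategoryB c = "other" then o + 1 else o)] from by
          simp [h, PySem.Dict.modify, PySem.Dict.insert, PySem.Dict.getD, PySem.Dict.get?,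
                PySem.Dict.contains]]
        rw [ih]
        simp [h]
        omega

-- B's loop over the four-key dict
lemma capSummary_loopB (caps : List String) (s m k o : Int) :
    (caps.foldl (fun d cap => d.modify (capCategoryB cap) 0 (· + 1))
      (PySem.Dict.mk [("skills", s), ("mcp_tools", m),
                      ("domain_knowledge", k), ("other", o)])).items
    = [("skills", s + ((caps.map capCategoryB).count "skills" : Int)),
       ("mcp_tools", m + ((caps.map capCategoryB).count "mcp_tools" : Int)),
       ("domain_knowledge", k + ((caps.map capCategoryB).count "domain_knowledge" : Int)),
       ("other", o + ((caps.map capCategoryB).count "other" : Int))] := by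
  induction caps generalizing s m k o with
  | nil => simp
  | cons c cs ih =>
    rw [List.foldl_cons]
    rcases capCategoryB_cases c with h | h | h | h <;>
      · rw [show PySem.Dict.modify (PySem.Dict.mk [("skills", s), ("mcp_tools", m), ("domain_knowledge", k), ("other", o)]) (capCategoryB c) 0 (· + 1) =
            PySem.Dict.mk [("skills", if capCategoryB c = "skills" then s + 1 else s), ("mcp_tools", if capCategoryB c = "mcp_tools" then m + 1 else m), ("domain_knowledge", if capCategoryB c = "domain_knowledge" then k + 1 else k), ("other", if capCategoryB c = "other" then o + 1 else o)] from by
          simp [h, PySem.Dict.modify, PySem.Dict.insert, PySem.Dict.getD, PySem.Dict.get?,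
                PySem.Dict.contains]]
        rw [ih]
        simp [h]
        omega

-- ===== VERDICT (by name: the statement is the Claim_ definition above) =====
theorem get_capability_summary_spec : Claim_equal_get_capability_summary := by
  intro caps _
  unfold Spec_get_capability_summary get_capability_summary get_capability_summary_alt
  have hstep : capSummaryStep = fun d cap => d.modify (capCategoryB cap) 0 (· + 1) :=
    funext fun d => funext fun cap => capSummaryStep_eq d cap
  rw [hstep]
  simp only [capSummary_loopA, capSummary_loopB]
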